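-- pv_equiv track=rewrite | github.com/dimk00z/summer_yandex_algorithmic_course | Homework_5/G_Hyper_checkers/G_Hyper_checkers_from_video.py | calculate_variants
-- ===== SOURCE A (Python) =====
-- def calculate_variants(n, k, x):
--     cntnums = {}
--     for now in x:
--         if now not in cntnums:
--             cntnums[now] = 0
--         cntnums[now] += 1
--     uniqnums = list(cntnums.keys())
--     uniqnums.sort()
--     r = 0
--     ans = 0
--     duplicates = 0
--
--     for l in range(len(uniqnums)):
--         while r < len(uniqnums) and uniqnums[l]*k >= uniqnums[r]:
--             if cntnums[uniqnums[r]] >= 2: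
--                 duplicates += 1
--             r += 1
--         rangelen = r-l
--         if cntnums[uniqnums[l]] >= 2:
--             ans += (rangelen-1)*3
--         if cntnums[uniqnums[l]] >= 3:
--             ans += 1
--         ans += (rangelen-1)*(rangelen-2)*3
--         if cntnums[uniqnums[l]] >= 2:
--             duplicates -= 1
--         ans += duplicates*3
--     return ans
-- ===== SOURCE B (Python) =====
-- def calculate_variants(n, k, x):
--     cnt = {}
--     for v in x:
--         cnt[v] = cnt.get(v, 0) + 1
--     uniq = sorted(cnt)
--     m = len(uniq)
--     # prefix[i] = how many of the first i distinct values have multiplicity >= 2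
--     prefix = [0]
--     for v in uniq:
--         prefix.append(prefix[-1] + (1 if cnt[v] >= 2 else 0))
--     ans = 0
--     r = 0
--     for l in range(m):
--         # first index whose value exceeds uniq[l]*k, found by binary search;
--         # the max keeps the window pointer monotone, as in the sliding-window recurrence
--         t = uniq[l] * k
--         lo, hi = 0, m
--         while lo < hi:
--             mid = (lo + hi) // 2
--             if uniq[mid] <= t:
--                 lo = mid + 1
--             else:
--                 hi = mid
--         r = max(r, lo)
--         g = r - l
--         c = cnt[uniq[l]]
--         ans += (g - 1) * (g - 2) * 3 + (prefix[r] - prefix[l + 1]) * 3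
--         if c >= 2:
--             ans += (g - 1) * 3
--         if c >= 3:
--             ans += 1
--     return ans
-- ===== Notes on version B (the rewrite author's own statement) =====
-- stated objective: alternative
-- what changed: Replaces A's stateful inner while-loop two-pointer with a running-duplicates accumulator by a precomputed prefix table of multiplicity>=2 values plus a per-index binary search (dups read off as P[r]-P[l+1], window end as max of the monotone pointer and bisect_right).
import Mathlib
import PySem

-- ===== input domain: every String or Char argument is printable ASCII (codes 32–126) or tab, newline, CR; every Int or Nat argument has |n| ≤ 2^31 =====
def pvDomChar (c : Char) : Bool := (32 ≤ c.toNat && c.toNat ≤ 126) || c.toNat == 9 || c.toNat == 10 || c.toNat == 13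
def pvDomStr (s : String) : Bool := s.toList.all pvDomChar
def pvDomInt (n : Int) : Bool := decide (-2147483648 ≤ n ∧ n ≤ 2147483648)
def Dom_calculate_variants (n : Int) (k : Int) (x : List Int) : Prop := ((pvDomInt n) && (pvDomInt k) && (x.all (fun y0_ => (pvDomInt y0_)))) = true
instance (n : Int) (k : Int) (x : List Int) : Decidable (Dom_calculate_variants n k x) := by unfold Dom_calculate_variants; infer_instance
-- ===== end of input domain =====

-- B replaces A's stateful two-pointer/running-duplicates window with a prefix table plus a
-- hand-written binary search per left index (objective: alternative decomposition).

-- ===== PORT A =====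
-- inner while loop of A: advance r while uniqnums[l]*k >= uniqnums[r], counting multiplicity>=2 values.
-- list/dict accesses use getD: the index is guarded in range and the key is always present, as in the Python.
def pvA_adv (uniq : List Int) (cnt : PySem.Dict Int Int) (t : Int) (r : Nat) (d : Int) : Nat × Int :=
  if h : r < uniq.length ∧ t ≥ uniq.getD r 0 then
    pvA_adv uniq cnt t (r + 1) (d + if cnt.getD (uniq.getD r 0) 0 ≥ 2 then 1 else 0)
  else (r, d)
termination_by uniq.length - r
decreasing_by omega

-- one iteration of A's `for l in range(len(uniqnums))` body, state (r, ans, duplicates)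
def pvA_step (uniq : List Int) (cnt : PySem.Dict Int Int) (k : Int)
    (st : Nat × Int × Int) (l : Nat) : Nat × Int × Int :=
  let rd := pvA_adv uniq cnt (uniq.getD l 0 * k) st.1 st.2.2
  let r := rd.1
  let rangelen : Int := (r : Int) - (l : Int)
  let c := cnt.getD (uniq.getD l 0) 0
  let ans := if c ≥ 2 then st.2.1 + (rangelen - 1) * 3 else st.2.1
  let ans := if c ≥ 3 then ans + 1 else ans
  let ans := ans + (rangelen - 1) * (rangelen - 2) * 3
  let dups := if c ≥ 2 then rd.2 - 1 else rd.2
  let ans := ans + dups * 3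
  (r, ans, dups)

def calculate_variants (n : Int) (k : Int) (x : List Int) : Int :=
  let cntnums := x.foldl (fun d now =>
    let d := if d.contains now then d else d.insert now 0
    d.insert now (d.getD now 0 + 1)) PySem.Dict.empty
  let uniqnums := PySem.List.sorted cntnums.keys (fun v => v)
  ((List.range uniqnums.length).foldl (pvA_step uniqnums cntnums k) (0, 0, 0)).2.1

-- ===== PORT B =====
-- Source B's hand-written bisect_right loop: first index in [lo, hi) whose value exceeds t
def pvB_bisect (uniq : List Int) (t : Int) (lo hi : Nat) : Nat :=
  if h : lo < hi then
    let mid := (lo + hi) / 2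
    if uniq.getD mid 0 ≤ t then pvB_bisect uniq t (mid + 1) hi else pvB_bisect uniq t lo mid
  else lo
termination_by hi - lo
decreasing_by all_goals omega

-- Source B's prefix list: prefix[i] = # of the first i distinct values with multiplicity >= 2
def pvB_prefix (uniq : List Int) (cnt : PySem.Dict Int Int) : List Int :=
  uniq.foldl (fun p v => p ++ [p.getLastD 0 + (if cnt.getD v 0 ≥ 2 then (1 : Int) else 0)]) [0]

-- one iteration of Source B's loop, state (r, ans)
def pvB_step (uniq : List Int) (cnt : PySem.Dict Int Int) (pref : List Int) (k : Int)
    (st : Nat × Int) (l : Nat) : Nat × Int :=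
  let lo := pvB_bisect uniq (uniq.getD l 0 * k) 0 uniq.length
  let r := max st.1 lo
  let g : Int := (r : Int) - (l : Int)
  let c := cnt.getD (uniq.getD l 0) 0
  let ans := st.2 + (g - 1) * (g - 2) * 3 + (pref.getD r 0 - pref.getD (l + 1) 0) * 3
  let ans := if c ≥ 2 then ans + (g - 1) * 3 else ans
  let ans := if c ≥ 3 then ans + 1 else ans
  (r, ans)

def calculate_variants_alt (n : Int) (k : Int) (x : List Int) : Int :=
  let cnt := x.foldl (fun d v => d.insert v (d.getD v 0 + 1)) PySem.Dict.empty
  let uniq := PySem.List.sorted cnt.keys (fun v => v)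
  let pref := pvB_prefix uniq cnt
  ((List.range uniq.length).foldl (pvB_step uniq cnt pref k) (0, 0)).2

-- ===== PRECONDITION & SPEC =====
def Spec_calculate_variants (n : Int) (k : Int) (x : List Int) (out : Int) : Prop := out = calculate_variants_alt n k x
instance (n : Int) (k : Int) (x : List Int) (out : Int) : Decidable (Spec_calculate_variants n k x out) := by unfold Spec_calculate_variants; infer_instance

-- ===== CLAIM (what is proved, stated in full; the proofs are below) =====
def Claim_equal_calculate_variants : Prop := ∀ (n : Int) (k : Int) (x : List Int), Dom_calculate_variants n k x → Spec_calculate_variants n k x (calculate_variants n k x)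

-- ===== LEMMAS AND PROOFS =====

-- prefix-count of multiplicity>=2 values among the first j distinct values
def pvS (uniq : List Int) (cnt : PySem.Dict Int Int) (j : Nat) : Int :=
  ((uniq.take j).map (fun v => if cnt.getD v 0 ≥ 2 then (1 : Int) else 0)).sum

-- c is the bisect_right cut of sorted uniq at threshold t
def pvCut (uniq : List Int) (t : Int) (c : Nat) : Prop :=
  c ≤ uniq.length ∧ (∀ i, i < c → uniq.getD i 0 ≤ t) ∧
    (∀ i, c ≤ i → i < uniq.length → t < uniq.getD i 0)

theorem pvS_succ (uniq : List Int) (cnt : PySem.Dict Int Int) (l : Nat) (hl : l < uniq.length) :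
    pvS uniq cnt (l + 1) = pvS uniq cnt l + (if cnt.getD (uniq.getD l 0) 0 ≥ 2 then (1 : Int) else 0) := by
  unfold pvS
  rw [List.getD_eq_getElem uniq 0 hl, List.take_add_one, List.getElem?_eq_getElem hl]
  rw [List.map_append, List.sum_append]
  simp

theorem pvGetD_mono (uniq : List Int) (hs : uniq.Pairwise (· ≤ ·)) (i j : Nat)
    (hij : i ≤ j) (hj : j < uniq.length) : uniq.getD i 0 ≤ uniq.getD j 0 := by
  rcases Nat.eq_or_lt_of_le hij with rfl | hlt
  · exact le_refl _
  · rw [List.getD_eq_getElem uniq 0 (lt_trans hlt hj), List.getD_eq_getElem uniq 0 hj]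
    exact List.pairwise_iff_getElem.mp hs i j (lt_trans hlt hj) hj hlt

theorem pvB_bisect_spec (uniq : List Int) (t : Int) (hs : uniq.Pairwise (· ≤ ·)) :
    ∀ (fuel lo hi : Nat), hi - lo ≤ fuel → hi ≤ uniq.length → lo ≤ hi →
    (∀ i, i < lo → uniq.getD i 0 ≤ t) → (∀ i, hi ≤ i → i < uniq.length → t < uniq.getD i 0) →
    pvCut uniq t (pvB_bisect uniq t lo hi) := by
  intro fuel
  induction fuel with
  | zero =>
    intro lo hi hf hhi hlh h1 h2
    rw [pvB_bisect, dif_neg (by omega)]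
    exact ⟨by omega, h1, fun i hi' hil => h2 i (by omega) hil⟩
  | succ n ih =>
    intro lo hi hf hhi hlh h1 h2
    rw [pvB_bisect]
    by_cases hlt : lo < hi
    · rw [dif_pos hlt]
      simp only
      split_ifs with hle
      · exact ih ((lo + hi) / 2 + 1) hi (by omega) hhi (by omega)
          (fun i hi' => le_trans (pvGetD_mono uniq hs i ((lo + hi) / 2) (by omega) (by omega)) hle)
          h2
      · exact ih lo ((lo + hi) / 2) (by omega) (by omega) (by omega) h1
          (fun i hmi hil => lt_of_lt_of_le (not_le.mp hle) (pvGetD_mono uniq hs ((lo + hi) / 2) i hmi hil))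
    · rw [dif_neg hlt]
      exact ⟨by omega, h1, fun i hi' hil => h2 i (by omega) hil⟩

theorem pvA_adv_spec (uniq : List Int) (cnt : PySem.Dict Int Int) (t : Int) (c : Nat)
    (hc : pvCut uniq t c) :
    ∀ (fuel r : Nat) (d : Int), uniq.length - r ≤ fuel → r ≤ uniq.length →
    pvA_adv uniq cnt t r d = (max r c, d + (pvS uniq cnt (max r c) - pvS uniq cnt r)) := by
  intro fuel
  induction fuel with
  | zero =>
    intro r d hf hr
    rw [pvA_adv, dif_neg (by omega)]
    have hm : max r c = r := by have := hc.1; omega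
    rw [hm]; simp
  | succ n ih =>
    intro r d hf hr
    by_cases hrc : r < c
    · have hrlen : r < uniq.length := by have := hc.1; omega
      rw [pvA_adv, dif_pos ⟨hrlen, hc.2.1 r hrc⟩]
      rw [ih (r + 1) _ (by omega) (by omega)]
      have hm1 : max (r + 1) c = max r c := by omega
      have hS : pvS uniq cnt (r + 1) = pvS uniq cnt r + (if cnt.getD (uniq.getD r 0) 0 ≥ 2 then (1 : Int) else 0) :=
        pvS_succ uniq cnt r hrlen
      rw [hm1, hS]
      refine Prod.ext rfl ?_
      simp only
      ring
    · rw [pvA_adv, dif_neg ?_]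
      · have hm : max r c = r := by omega
        rw [hm]; simp
      · rintro ⟨h1, h2⟩
        exact absurd (hc.2.2 r (by omega) h1) (not_lt.mpr h2)

def pvPsums (cnt : PySem.Dict Int Int) : Int → List Int → List Int
  | _, [] => []
  | s, v :: tl =>
      (s + (if cnt.getD v 0 ≥ 2 then (1 : Int) else 0)) ::
        pvPsums cnt (s + (if cnt.getD v 0 ≥ 2 then (1 : Int) else 0)) tl

theorem pvPrefix_foldl (cnt : PySem.Dict Int Int) :
    ∀ (l acc : List Int),
    l.foldl (fun p v => p ++ [p.getLastD 0 + (if cnt.getD v 0 ≥ 2 then (1 : Int) else 0)]) acc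
      = acc ++ pvPsums cnt (acc.getLastD 0) l := by
  intro l
  induction l with
  | nil => intro acc; simp [pvPsums]
  | cons v tl ih =>
    intro acc
    rw [List.foldl_cons, ih, pvPsums]
    rw [List.getLastD_concat]
    simp

theorem pvPsums_getD (cnt : PySem.Dict Int Int) :
    ∀ (l : List Int) (s : Int) (j : Nat), j ≤ l.length →
    (s :: pvPsums cnt s l).getD j 0
      = s + ((l.take j).map (fun v => if cnt.getD v 0 ≥ 2 then (1 : Int) else 0)).sum := by
  intro l
  induction l with
  | nil =>
    intro s j hj
    have : j = 0 := by simpa using hj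
    subst this; simp
  | cons v tl ih =>
    intro s j hj
    cases j with
    | zero => simp
    | succ j' =>
      rw [pvPsums]
      have := ih (s + (if cnt.getD v 0 ≥ 2 then (1 : Int) else 0)) j' (by simpa using hj)
      simp only [List.getD_cons_succ] at this ⊢
      rw [this]
      simp [List.take_succ_cons]
      ring

theorem pvB_prefix_getD (uniq : List Int) (cnt : PySem.Dict Int Int) :
    ∀ j, j ≤ uniq.length → (pvB_prefix uniq cnt).getD j 0 = pvS uniq cnt j := by
  intro j hj
  unfold pvB_prefix pvS
  rw [pvPrefix_foldl]
  have h1 : (([(0 : Int)] : List Int)).getLastD 0 = 0 := by simp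
  rw [h1]
  have h2 : ([(0 : Int)] : List Int) ++ pvPsums cnt 0 uniq = (0 : Int) :: pvPsums cnt 0 uniq := by simp
  rw [h2, pvPsums_getD cnt uniq 0 j hj]
  simp

theorem pvStep_eq (uniq : List Int) (cnt : PySem.Dict Int Int) (k : Int)
    (hs : uniq.Pairwise (· ≤ ·)) (l0 r : Nat) (ans dA : Int)
    (hl0 : l0 < uniq.length) (hr : r ≤ uniq.length)
    (hinv : dA = pvS uniq cnt r - pvS uniq cnt l0) :
    ∃ (r' : Nat) (ans' : Int), r' ≤ uniq.length ∧
      pvA_step uniq cnt k (r, ans, dA) l0 = (r', ans', pvS uniq cnt r' - pvS uniq cnt (l0 + 1)) ∧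
      pvB_step uniq cnt (pvB_prefix uniq cnt) k (r, ans) l0 = (r', ans') := by
  have hcut : pvCut uniq (uniq.getD l0 0 * k) (pvB_bisect uniq (uniq.getD l0 0 * k) 0 uniq.length) :=
    pvB_bisect_spec uniq _ hs uniq.length 0 uniq.length (by omega) le_rfl (by omega)
      (by intro i hi; omega) (by intro i h1 h2; omega)
  have hadv := pvA_adv_spec uniq cnt (uniq.getD l0 0 * k)
    (pvB_bisect uniq (uniq.getD l0 0 * k) 0 uniq.length) hcut uniq.length r dA (by omega) hr
  have hr' : max r (pvB_bisect uniq (uniq.getD l0 0 * k) 0 uniq.length) ≤ uniq.length := by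
    have := hcut.1; omega
  have hS := pvS_succ uniq cnt l0 hl0
  refine ⟨max r (pvB_bisect uniq (uniq.getD l0 0 * k) 0 uniq.length),
    (pvB_step uniq cnt (pvB_prefix uniq cnt) k (r, ans) l0).2, hr', ?_, ?_⟩
  · simp only [pvA_step, pvB_step]
    rw [hadv]
    simp only
    rw [pvB_prefix_getD uniq cnt _ hr', pvB_prefix_getD uniq cnt (l0 + 1) (by omega)]
    rw [hinv, hS]
    refine Prod.ext rfl (Prod.ext ?_ ?_) <;> simp only <;> split_ifs <;> ring
  · exact Prod.ext (by simp only [pvB_step]) rfl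

theorem pvLoop (uniq : List Int) (cnt : PySem.Dict Int Int) (k : Int)
    (hs : uniq.Pairwise (· ≤ ·)) :
    ∀ (c l0 r : Nat) (ans dA : Int), l0 + c ≤ uniq.length → r ≤ uniq.length →
    dA = pvS uniq cnt r - pvS uniq cnt l0 →
    ((List.range' l0 c).foldl (pvA_step uniq cnt k) (r, ans, dA)).2.1
      = ((List.range' l0 c).foldl (pvB_step uniq cnt (pvB_prefix uniq cnt) k) (r, ans)).2 := by
  intro c
  induction c with
  | zero => intro l0 r ans dA hlen hr hinv; simp
  | succ c ih =>
    intro l0 r ans dA hlen hr hinv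
    rw [List.range'_succ, List.foldl_cons, List.foldl_cons]
    obtain ⟨r', ans', hr', hA, hB⟩ :=
      pvStep_eq uniq cnt k hs l0 r ans dA (by omega) hr hinv
    rw [hA, hB]
    exact ih (l0 + 1) r' ans' _ (by omega) hr' rfl

theorem pvDict_eq (x : List Int) :
    x.foldl (fun d now =>
      let d := if d.contains now then d else d.insert now 0
      d.insert now (d.getD now 0 + 1)) (PySem.Dict.empty : PySem.Dict Int Int)
    = x.foldl (fun d v => d.insert v (d.getD v 0 + 1)) PySem.Dict.empty := by
  apply PySem.List.foldl_congr_mem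
  intro d now _
  simp only
  cases hcon : d.contains now with
  | true => simp
  | false =>
    simp only [Bool.false_eq_true, if_false]
    rw [PySem.Dict.getD_insert_self, PySem.Dict.insert_insert_self,
      PySem.Dict.getD_of_not_contains d 0 hcon]

-- ===== VERDICT (by name: the statement is the Claim_ definition above) =====
theorem calculate_variants_spec : Claim_equal_calculate_variants := by
  intro n k x _
  unfold Spec_calculate_variants calculate_variants calculate_variants_alt
  simp only [pvDict_eq, PySem.Dict.foldl_insert_getD_add_one_eq_counter]
  have hs : (PySem.List.sorted (PySem.Dict.counter x : PySem.Dict Int Int).keys (fun v => v)).Pairwise (· ≤ ·) := by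
    rw [PySem.Dict.keys_counter]
    exact (PySem.List.sorted_ofList_pairwise_lt x).imp le_of_lt
  rw [List.range_eq_range']
  exact pvLoop _ (PySem.Dict.counter x) k hs
    ((PySem.List.sorted (PySem.Dict.counter x : PySem.Dict Int Int).keys (fun v => v)).length)
    0 0 0 0 (by omega) (by omega) (by simp [pvS])
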